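-- pv_equiv track=rewrite | github.com/TaCeiN/RAG-CPU | app/api/routes/chats.py | _extract_bibliography_section
-- ===== SOURCE A (Python) =====
-- BIBLIO_SECTION_HEADINGS = (
--     "список использованных источников",
--     "список используемых источников",
--     "список источников",
--     "список литературы",
--     "использованные источники",
--     "используемые источники",
--     "литература",
--     "references",
--     "bibliography",
-- )
--
-- BIBLIO_STOP_HEADINGS = (
--     "приложение",
--     "appendix",
-- )
--
-- def _extract_bibliography_section(text: str) -> str | None:
--     if not text.strip():
--         return None
--     lines = [line.strip() for line in text.splitlines() if line.strip()]
--     start_idx: int | None = None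
--     for idx, line in enumerate(lines):
--         normalized = line.lower().strip(" :.-")
--         if any(normalized.startswith(heading) for heading in BIBLIO_SECTION_HEADINGS):
--             start_idx = idx
--             break
--     if start_idx is None:
--         return None
--
--     collected: list[str] = [lines[start_idx]]
--     for line in lines[start_idx + 1 :]:
--         normalized = line.lower().strip(" :.-")
--         if any(normalized.startswith(heading) for heading in BIBLIO_STOP_HEADINGS):
--             break
--         collected.append(line)
--
--     section = "\n".join(collected).strip()
--     return section if section else None
-- ===== SOURCE B (Python) =====
-- BIBLIO_SECTION_HEADINGS = (
--     "список использованных источников",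
--     "список используемых источников",
--     "список источников",
--     "список литературы",
--     "использованные источники",
--     "используемые источники",
--     "литература",
--     "references",
--     "bibliography",
-- )
--
-- BIBLIO_STOP_HEADINGS = (
--     "приложение",
--     "appendix",
-- )
--
--
-- def _extract_bibliography_section(text: str) -> str | None:
--     # single pass with a state flag instead of find-index-then-slice
--     if not text.strip():
--         return None
--     collected: list[str] = []
--     collecting = False
--     for raw in text.splitlines():
--         line = raw.strip()
--         if not line:
--             continue
--         normalized = line.lower().strip(" :.-")
--         if collecting:
--             if any(normalized.startswith(h) for h in BIBLIO_STOP_HEADINGS):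
--                 break
--             collected.append(line)
--         elif any(normalized.startswith(h) for h in BIBLIO_SECTION_HEADINGS):
--             collected.append(line)
--             collecting = True
--     return "\n".join(collected) if collected else None
-- ===== Notes on version B (the rewrite author's own statement) =====
-- stated objective: simpler
-- what changed: Replaces the two-phase structure (build the cleaned line list, scan for the start index, then slice and run a second collection loop, then re-strip the joined section) with a single pass over the raw lines using a collecting flag, appending directly and returning the join without the redundant final strip.
import Mathlib
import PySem

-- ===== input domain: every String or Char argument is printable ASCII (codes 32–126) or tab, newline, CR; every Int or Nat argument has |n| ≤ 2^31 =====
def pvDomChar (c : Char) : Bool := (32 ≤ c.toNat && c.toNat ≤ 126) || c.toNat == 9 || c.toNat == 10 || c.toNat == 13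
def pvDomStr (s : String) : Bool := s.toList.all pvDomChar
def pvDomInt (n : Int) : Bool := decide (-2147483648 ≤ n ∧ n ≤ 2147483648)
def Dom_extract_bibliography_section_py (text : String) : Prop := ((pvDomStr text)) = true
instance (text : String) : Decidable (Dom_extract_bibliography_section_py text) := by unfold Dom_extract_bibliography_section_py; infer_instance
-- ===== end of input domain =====

-- B replaces A's two-phase find-start-index-then-slice-and-collect structure with a single pass
-- carrying a collecting flag, and drops the redundant final strip of the joined section (objective: simpler).

-- shared module constants
def pvBiblioHeadings : List String :=
  ["список использованных источников", "список используемых источников", "список источников",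
   "список литературы", "использованные источники", "используемые источники", "литература",
   "references", "bibliography"]

def pvStopHeadings : List String := ["приложение", "appendix"]

-- normalized = line.lower().strip(" :.-")  (identical expression in A and B)
def pvNormalize (line : List Char) : List Char :=
  PySem.Chars.stripChars (PySem.Chars.lower line) " :.-".toList

def pvIsStart (line : List Char) : Bool :=
  pvBiblioHeadings.any (fun h => PySem.Chars.startswith (pvNormalize line) h.toList)

def pvIsStop (line : List Char) : Bool :=
  pvStopHeadings.any (fun h => PySem.Chars.startswith (pvNormalize line) h.toList)

-- ===== PORT A =====
-- the first loop: enumerate + break on the first heading line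
def pvFindStart : List (List Char) → Nat → Option Nat
  | [], _ => none
  | l :: rest, idx => if pvIsStart l then some idx else pvFindStart rest (idx + 1)

-- the second loop: append until a stop heading breaks
def pvCollectA : List (List Char) → List (List Char)
  | [] => []
  | l :: rest => if pvIsStop l then [] else l :: pvCollectA rest

def extract_bibliography_section_py (text : String) : Option String :=
  if PySem.Chars.strip text.toList = [] then none
  else
    let lines := ((PySem.Chars.splitlines text.toList).filter
        (fun l => !(PySem.Chars.strip l).isEmpty)).map PySem.Chars.strip
    match pvFindStart lines 0 with
    | none => none
    | some start_idx =>
      let collected := PySem.List.pyGetD lines (start_idx : Int) [] ::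
        pvCollectA (PySem.List.slice lines (some ((start_idx : Int) + 1)) none)
      let sec := PySem.Chars.strip (PySem.Chars.join ['\n'] collected)
      if sec = [] then none else some (String.ofList sec)

-- ===== PORT B =====
-- single pass with a collecting flag; break returns the accumulator
def pvScanB : List (List Char) → Bool → List (List Char) → List (List Char)
  | [], _, collected => collected
  | raw :: rest, collecting, collected =>
    let line := PySem.Chars.strip raw
    if line.isEmpty then pvScanB rest collecting collected
    else if collecting then
      if pvIsStop line then collected
      else pvScanB rest collecting (collected ++ [line])
    else if pvIsStart line then pvScanB rest true (collected ++ [line])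
    else pvScanB rest collecting collected

def extract_bibliography_section_py_alt (text : String) : Option String :=
  if PySem.Chars.strip text.toList = [] then none
  else
    let collected := pvScanB (PySem.Chars.splitlines text.toList) false []
    if collected.isEmpty then none
    else some (String.ofList (PySem.Chars.join ['\n'] collected))

-- ===== PRECONDITION & SPEC =====
def Spec_extract_bibliography_section_py (text : String) (out : Option String) : Prop := out = extract_bibliography_section_py_alt text
instance (text : String) (out : Option String) : Decidable (Spec_extract_bibliography_section_py text out) := by unfold Spec_extract_bibliography_section_py; infer_instance

-- ===== CLAIM (what is proved, stated in full; the proofs are below) =====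
def Claim_equal_extract_bibliography_section_py : Prop := ∀ (text : String), Dom_extract_bibliography_section_py text → Spec_extract_bibliography_section_py text (extract_bibliography_section_py text)

-- ===== LEMMAS AND PROOFS =====

-- abstract one-pass collection over the already-cleaned line list
def pvG : List (List Char) → List (List Char)
  | [] => []
  | l :: rest => if pvIsStart l then l :: pvCollectA rest else pvG rest

theorem pvFindStart_shift (lines : List (List Char)) (n : Nat) :
    pvFindStart lines (n + 1) = (pvFindStart lines n).map (· + 1) := by
  induction lines generalizing n with
  | nil => rfl
  | cons l rest ih =>
    by_cases h : pvIsStart l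
    · simp [pvFindStart, h]
    · simp [pvFindStart, h, ih]

theorem pvFindStart_none (lines : List (List Char)) (h : pvFindStart lines 0 = none) :
    pvG lines = [] := by
  induction lines with
  | nil => rfl
  | cons l rest ih =>
    by_cases hs : pvIsStart l
    · simp [pvFindStart, hs] at h
    · have h' : (pvFindStart rest 0).map (· + 1) = none := by
        rw [← pvFindStart_shift]; simpa [pvFindStart, hs] using h
      simp only [Option.map_eq_none_iff] at h'
      simp [pvG, hs, ih h']

theorem pvFindStart_some (lines : List (List Char)) (i : Nat) (h : pvFindStart lines 0 = some i) :
    lines.getD i [] :: pvCollectA (lines.drop (i + 1)) = pvG lines := by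
  induction lines generalizing i with
  | nil => simp [pvFindStart] at h
  | cons l rest ih =>
    by_cases hs : pvIsStart l
    · simp only [pvFindStart, hs, if_true, Option.some.injEq] at h
      subst h
      simp [pvG, hs]
    · have h' : (pvFindStart rest 0).map (· + 1) = some i := by
        rw [← pvFindStart_shift]; simpa [pvFindStart, hs] using h
      obtain ⟨j, hj, rfl⟩ := Option.map_eq_some_iff.mp h'
      have := ih j hj
      simpa [pvG, hs, List.drop_succ_cons, List.getD_cons_succ] using this

theorem pvScanB_eq (raws : List (List Char)) (c : Bool) (acc : List (List Char)) :
    pvScanB raws c acc = acc ++ (if c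
      then pvCollectA ((raws.filter (fun l => !(PySem.Chars.strip l).isEmpty)).map PySem.Chars.strip)
      else pvG ((raws.filter (fun l => !(PySem.Chars.strip l).isEmpty)).map PySem.Chars.strip)) := by
  induction raws generalizing c acc with
  | nil => cases c <;> simp [pvScanB, pvCollectA, pvG]
  | cons raw rest ih =>
    by_cases hline : (PySem.Chars.strip raw).isEmpty
    · cases c <;> simp [pvScanB, hline, ih]
    · cases c with
      | true =>
        by_cases hstop : pvIsStop (PySem.Chars.strip raw)
        · simp [pvScanB, hline, hstop, pvCollectA]
        · simp [pvScanB, hline, hstop, pvCollectA, ih]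
      | false =>
        by_cases hstart : pvIsStart (PySem.Chars.strip raw)
        · simp [pvScanB, hline, hstart, pvG, ih]
        · simp [pvScanB, hline, hstart, pvG, ih]

theorem pvMem_collectA {x : List Char} {l : List (List Char)} (h : x ∈ pvCollectA l) : x ∈ l := by
  induction l with
  | nil => simp [pvCollectA] at h
  | cons y rest ih =>
    by_cases hs : pvIsStop y
    · simp [pvCollectA, hs] at h
    · rw [pvCollectA] at h
      simp only [hs, if_false, Bool.false_eq_true, List.mem_cons] at h
      rcases h with h | h
      · simp [h]
      · simp [ih h]

theorem pvMem_pvG {x : List Char} {l : List (List Char)} (h : x ∈ pvG l) : x ∈ l := by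
  induction l with
  | nil => simp [pvG] at h
  | cons y rest ih =>
    by_cases hs : pvIsStart y
    · rw [pvG] at h
      simp only [hs, if_true, List.mem_cons] at h
      rcases h with h | h
      · simp [h]
      · simp [pvMem_collectA h]
    · rw [pvG] at h
      simp only [hs, if_false, Bool.false_eq_true] at h
      simp [ih h]

-- strip machinery
theorem pvLstrip_fix_head (c : Char) (u z : List Char) (hc : PySem.Chars.isspace c = false) :
    PySem.Chars.lstrip ((c :: u) ++ z) = (c :: u) ++ z := by
  simp [PySem.Chars.lstrip, hc]

theorem pvLstrip_eq_self_head {x : List Char} (h : PySem.Chars.lstrip x = x) (c : Char) (u : List Char)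
    (hx : x = c :: u) : PySem.Chars.isspace c = false := by
  subst hx
  by_contra hne'
  have hc : PySem.Chars.isspace c = true := by simpa using hne'
  rw [PySem.Chars.lstrip, List.dropWhile_cons_of_pos hc] at h
  have h1 := List.length_dropWhile_le PySem.Chars.isspace u
  have h2 := congrArg List.length h
  simp at h2
  omega

theorem pvFix_split {x : List Char} (h : PySem.Chars.strip x = x) (_hne : x ≠ []) :
    PySem.Chars.lstrip x = x ∧ PySem.Chars.rstrip x = x := by
  have hsuf : PySem.Chars.lstrip x <:+ x := List.dropWhile_suffix _
  have hlen1 : (PySem.Chars.lstrip x).length ≤ x.length := hsuf.length_le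
  have hlen2 : (PySem.Chars.rstrip (PySem.Chars.lstrip x)).length ≤ (PySem.Chars.lstrip x).length := by
    simpa [PySem.Chars.rstrip] using
      List.length_dropWhile_le PySem.Chars.isspace (PySem.Chars.lstrip x).reverse
  rw [show PySem.Chars.rstrip (PySem.Chars.lstrip x) = PySem.Chars.strip x from rfl, h] at hlen2
  have hl : PySem.Chars.lstrip x = x := hsuf.eq_of_length (by omega)
  refine ⟨hl, ?_⟩
  calc PySem.Chars.rstrip x = PySem.Chars.rstrip (PySem.Chars.lstrip x) := by rw [hl]
    _ = PySem.Chars.strip x := rfl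
    _ = x := h

theorem pvStrip_idem (r : List Char) (h : PySem.Chars.strip r ≠ []) :
    PySem.Chars.strip (PySem.Chars.strip r) = PySem.Chars.strip r := by
  have hrr : PySem.Chars.rstrip (PySem.Chars.strip r) = PySem.Chars.strip r := by
    simp [PySem.Chars.strip, PySem.Chars.rstrip, List.dropWhile_idempotent]
  have hpre : PySem.Chars.strip r <+: PySem.Chars.lstrip r := by
    rw [← List.reverse_suffix]
    simpa [PySem.Chars.strip, PySem.Chars.rstrip] using
      List.dropWhile_suffix (l := (PySem.Chars.lstrip r).reverse) PySem.Chars.isspace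
  obtain ⟨c, u, hcu⟩ : ∃ c u, PySem.Chars.strip r = c :: u := by
    cases hx : PySem.Chars.strip r with
    | nil => exact absurd hx h
    | cons c u => exact ⟨c, u, rfl⟩
  obtain ⟨t, ht⟩ := hpre
  have hfix : PySem.Chars.lstrip (PySem.Chars.lstrip r) = PySem.Chars.lstrip r :=
    List.dropWhile_idempotent _ _
  have hl2 : PySem.Chars.lstrip r = c :: (u ++ t) := by rw [← ht, hcu]; simp
  have hhead : PySem.Chars.isspace c = false := pvLstrip_eq_self_head hfix c (u ++ t) hl2
  have hls : PySem.Chars.lstrip (PySem.Chars.strip r) = PySem.Chars.strip r := by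
    rw [hcu, PySem.Chars.lstrip, List.dropWhile_cons_of_neg (by simp [hhead])]
  rw [PySem.Chars.strip, hls, hrr]

theorem pvRstrip_append {x z : List Char} (h : PySem.Chars.rstrip x = x) (hne : x ≠ []) :
    PySem.Chars.rstrip (z ++ x) = z ++ x := by
  have hrev : PySem.Chars.lstrip x.reverse = x.reverse := by
    have := congrArg List.reverse h
    simpa [PySem.Chars.rstrip, PySem.Chars.lstrip] using this
  obtain ⟨c, u, hcu⟩ : ∃ c u, x.reverse = c :: u := by
    cases hx : x.reverse with
    | nil => exact absurd (by simpa using congrArg List.reverse hx) hne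
    | cons c u => exact ⟨c, u, rfl⟩
  have hc : PySem.Chars.isspace c = false := pvLstrip_eq_self_head hrev c u hcu
  have : PySem.Chars.lstrip (x.reverse ++ z.reverse) = x.reverse ++ z.reverse := by
    rw [hcu]; exact pvLstrip_fix_head c u z.reverse hc
  rw [PySem.Chars.rstrip, List.reverse_append, show PySem.Chars.lstrip = List.dropWhile PySem.Chars.isspace from rfl] at *
  rw [this]
  simp

theorem pvLstrip_append {x z : List Char} (h : PySem.Chars.lstrip x = x) (hne : x ≠ []) :
    PySem.Chars.lstrip (x ++ z) = x ++ z := by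
  obtain ⟨c, u, hcu⟩ : ∃ c u, x = c :: u := by
    cases hx : x with
    | nil => exact absurd hx hne
    | cons c u => exact ⟨c, u, rfl⟩
  have hc : PySem.Chars.isspace c = false := pvLstrip_eq_self_head h c u hcu
  rw [hcu]
  exact pvLstrip_fix_head c u z hc

theorem pvJoin_fixed (c : List (List Char)) (hall : ∀ x ∈ c, x ≠ [] ∧ PySem.Chars.strip x = x)
    (hne : c ≠ []) :
    PySem.Chars.strip (PySem.Chars.join ['\n'] c) = PySem.Chars.join ['\n'] c ∧
      PySem.Chars.join ['\n'] c ≠ [] := by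
  induction c with
  | nil => exact absurd rfl hne
  | cons x rest ih =>
    obtain ⟨hxne, hxs⟩ := hall x (by simp)
    obtain ⟨hlx, hrx⟩ := pvFix_split hxs hxne
    cases rest with
    | nil =>
      constructor
      · simpa [PySem.Chars.join, List.intercalate] using hxs
      · simpa [PySem.Chars.join, List.intercalate] using hxne
    | cons y rest' =>
      have hall' : ∀ z ∈ y :: rest', z ≠ [] ∧ PySem.Chars.strip z = z :=
        fun z hz => hall z (by simp [hz])
      obtain ⟨ihs, ihne⟩ := ih hall' (by simp)
      obtain ⟨hlJ, hrJ⟩ := pvFix_split ihs ihne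
      have hJ : PySem.Chars.join ['\n'] (x :: y :: rest') =
          x ++ ('\n' :: PySem.Chars.join ['\n'] (y :: rest')) := by
        simp [PySem.Chars.join, List.intercalate]
      constructor
      · rw [hJ, PySem.Chars.strip,
          pvLstrip_append hlx hxne,
          show x ++ ('\n' :: PySem.Chars.join ['\n'] (y :: rest')) =
            (x ++ ['\n']) ++ PySem.Chars.join ['\n'] (y :: rest') by simp,
          pvRstrip_append hrJ ihne]
      · rw [hJ]
        simp

-- ===== VERDICT (by name: the statement is the Claim_ definition above) =====
theorem extract_bibliography_section_py_spec : Claim_equal_extract_bibliography_section_py := by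
  intro text _
  unfold Spec_extract_bibliography_section_py
  unfold extract_bibliography_section_py extract_bibliography_section_py_alt
  by_cases h0 : PySem.Chars.strip text.toList = []
  · simp [h0]
  · simp only [h0, if_false]
    rw [pvScanB_eq]
    set lines := ((PySem.Chars.splitlines text.toList).filter
        (fun l => !(PySem.Chars.strip l).isEmpty)).map PySem.Chars.strip with hlines
    have hmem : ∀ x ∈ pvG lines, x ≠ [] ∧ PySem.Chars.strip x = x := by
      intro x hx
      have hxl := pvMem_pvG hx
      rw [hlines] at hxl
      simp only [List.mem_map, List.mem_filter] at hxl
      obtain ⟨r, ⟨_, hrne⟩, rfl⟩ := hxl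
      have hrne' : PySem.Chars.strip r ≠ [] := by simpa using hrne
      exact ⟨hrne', pvStrip_idem r hrne'⟩
    cases hfs : pvFindStart lines 0 with
    | none =>
      have hg := pvFindStart_none _ hfs
      simp [hg]
    | some i =>
      have hcoll := pvFindStart_some _ _ hfs
      have hget : PySem.List.pyGetD lines (i : Int) [] = lines.getD i [] :=
        PySem.List.pyGetD_natCast lines i []
      have hslice : PySem.List.slice lines (some ((i : Int) + 1)) none = lines.drop (i + 1) := by
        rw [show ((i : Int) + 1) = ((i + 1 : Nat) : Int) by push_cast; ring,
          PySem.List.slice_from lines (by positivity)]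
        simp
      have hGne : pvG lines ≠ [] := by rw [← hcoll]; simp
      obtain ⟨hs, hne'⟩ := pvJoin_fixed (pvG lines) hmem hGne
      simp only [hget, hslice, hcoll]
      simp [hs, hne', hGne]
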